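-- pv_equiv track=rewrite | github.com/rajveerkhosa/Kinetiq | core/python/kinetiq_core/ml/plateau.py | _days_since_epoch
-- ===== SOURCE A (Python) =====
-- def _days_since_epoch(year: int, month: int, day: int) -> int:
--     """Compute a simple integer day ordinal (doesn't need to be from any real epoch)."""
--     # Simplified ordinal: cumulative days, good enough for week differences
--     days_per_month = [0, 31, 28, 31, 30, 31, 30, 31, 31, 30, 31, 30, 31]
--     leap = (year % 4 == 0 and year % 100 != 0) or (year % 400 == 0)
--     if leap:
--         days_per_month[2] = 29
--     ordinal = year * 365 + year // 4 - year // 100 + year // 400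
--     for m in range(1, month):
--         ordinal += days_per_month[m]
--     ordinal += day
--     return ordinal
-- ===== SOURCE B (Python) =====
-- _CUM_DAYS = [0, 31, 59, 90, 120, 151, 181, 212, 243, 273, 304, 334, 365]
--
--
-- def _days_since_epoch(year: int, month: int, day: int) -> int:
--     """Compute a simple integer day ordinal via a cumulative days-before-month table."""
--     leap = (year % 4 == 0 and year % 100 != 0) or (year % 400 == 0)
--     ordinal = year * 365 + year // 4 - year // 100 + year // 400
--     if month >= 1:
--         ordinal += _CUM_DAYS[month - 1]
--     if leap and month >= 3:
--         ordinal += 1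
--     return ordinal + day
-- ===== Notes on version B (the rewrite author's own statement) =====
-- stated objective: simpler
-- what changed: Replaces the per-month summing loop over days_per_month (with an in-place February mutation) by a single lookup in a precomputed cumulative table plus a +1 leap adjustment for months >= 3.
import Mathlib
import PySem

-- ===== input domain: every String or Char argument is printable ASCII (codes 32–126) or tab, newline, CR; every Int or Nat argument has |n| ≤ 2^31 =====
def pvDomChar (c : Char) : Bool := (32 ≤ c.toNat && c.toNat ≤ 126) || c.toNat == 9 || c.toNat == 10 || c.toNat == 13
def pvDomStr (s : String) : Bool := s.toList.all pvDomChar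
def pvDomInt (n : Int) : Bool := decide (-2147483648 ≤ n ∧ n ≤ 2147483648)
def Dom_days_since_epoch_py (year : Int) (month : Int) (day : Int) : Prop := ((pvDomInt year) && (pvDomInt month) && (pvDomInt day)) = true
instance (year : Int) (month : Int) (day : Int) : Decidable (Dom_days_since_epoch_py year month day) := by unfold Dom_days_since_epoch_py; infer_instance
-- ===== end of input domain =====

-- B replaces A's per-month summing loop by one cumulative-table lookup plus a leap adjustment (objective: simpler).

-- ===== PORT A =====
def days_since_epoch_py (year : Int) (month : Int) (day : Int) : Int :=
  let days_per_month : List Int := [0, 31, 28, 31, 30, 31, 30, 31, 31, 30, 31, 30, 31]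
  let leap : Bool := (PySem.Int.mod year 4 == 0 && !(PySem.Int.mod year 100 == 0)) || (PySem.Int.mod year 400 == 0)
  let days_per_month := if leap then PySem.List.pySetD days_per_month 2 29 else days_per_month
  let ordinal := year * 365 + PySem.Int.floordiv year 4 - PySem.Int.floordiv year 100 + PySem.Int.floordiv year 400
  let ordinal := (PySem.List.pyRange 1 month 1).foldl (fun o m => o + PySem.List.pyGetD days_per_month m 0) ordinal
  ordinal + day

-- ===== PORT B =====
def cumDays : List Int := [0, 31, 59, 90, 120, 151, 181, 212, 243, 273, 304, 334, 365]

def days_since_epoch_py_alt (year : Int) (month : Int) (day : Int) : Int :=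
  let leap : Bool := (PySem.Int.mod year 4 == 0 && !(PySem.Int.mod year 100 == 0)) || (PySem.Int.mod year 400 == 0)
  let ordinal := year * 365 + PySem.Int.floordiv year 4 - PySem.Int.floordiv year 100 + PySem.Int.floordiv year 400
  let ordinal := if month ≥ 1 then ordinal + PySem.List.pyGetD cumDays (month - 1) 0 else ordinal
  let ordinal := if leap && month ≥ 3 then ordinal + 1 else ordinal
  ordinal + day

-- ===== PRECONDITION & SPEC =====
-- A raises IndexError (days_per_month[m] for m ≥ 13) exactly when month ≥ 14; Pre_ excludes only those inputs.
def Pre_days_since_epoch_py (_year : Int) (month : Int) (_day : Int) : Prop := month ≤ 13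
instance (year : Int) (month : Int) (day : Int) : Decidable (Pre_days_since_epoch_py year month day) := by unfold Pre_days_since_epoch_py; infer_instance
def pvWitness_days_since_epoch_py : Int × Int × Int := (2024, 7, 15)

def Spec_days_since_epoch_py (year : Int) (month : Int) (day : Int) (out : Int) : Prop := out = days_since_epoch_py_alt year month day
instance (year : Int) (month : Int) (day : Int) (out : Int) : Decidable (Spec_days_since_epoch_py year month day out) := by unfold Spec_days_since_epoch_py; infer_instance

-- ===== CLAIM (what is proved, stated in full; the proofs are below) =====
def Claim_equal_days_since_epoch_py : Prop := ∀ (year : Int) (month : Int) (day : Int), Dom_days_since_epoch_py year month day → Pre_days_since_epoch_py year month day → Spec_days_since_epoch_py year month day (days_since_epoch_py year month day)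

-- ===== LEMMAS AND PROOFS =====

theorem days_since_epoch_py_key (L : Bool) (b day month : Int) (hm : month ≤ 13) :
    ((PySem.List.pyRange 1 month 1).foldl
        (fun o m => o + PySem.List.pyGetD
          (if L then PySem.List.pySetD [0, 31, 28, 31, 30, 31, 30, 31, 31, 30, 31, 30, 31] 2 29
           else ([0, 31, 28, 31, 30, 31, 30, 31, 31, 30, 31, 30, 31] : List Int)) m 0) b) + day
    = (if L && month ≥ 3 then
        (if month ≥ 1 then b + PySem.List.pyGetD cumDays (month - 1) 0 else b) + 1
       else (if month ≥ 1 then b + PySem.List.pyGetD cumDays (month - 1) 0 else b)) + day := by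
  rcases Int.lt_or_le month 1 with h | h
  · have hr : PySem.List.pyRange 1 month 1 = [] := by
      rw [PySem.List.pyRange_one]
      have : (month - 1).toNat = 0 := by omega
      simp [this]
    have h1 : ¬ (month ≥ 1) := by omega
    have h3 : ¬ (month ≥ 3) := by omega
    rw [hr]
    simp [h1, h3]
  · interval_cases month <;> cases L <;>
      simp [PySem.List.pyRange_one, List.range_succ, cumDays, PySem.List.pySetD, PySem.List.pyGetD,
            PySem.List.pyGet?, PySem.List.pyIdx?, PySem.List.pySet?, List.set] <;> omega

-- ===== VERDICT (by name: the statement is the Claim_ definition above) =====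
theorem days_since_epoch_py_spec : Claim_equal_days_since_epoch_py := by
  intro year month day _ hpre
  unfold Spec_days_since_epoch_py days_since_epoch_py days_since_epoch_py_alt
  exact days_since_epoch_py_key _ _ day month hpre
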